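-- pv_equiv track=rewrite | github.com/fanhua69/Python2 | movestring.py | moveString
-- ===== SOURCE A (Python) =====
-- def moveString(strings,startstring):
--
--     i = 0
--     for j in range(len(strings)):
--         if strings[j].startswith(startstring):
--             s=strings[j]
--             for k in range(j,i,-1):
--                 strings[k]=strings[k-1]
--             strings[i]=s
--             i=i+1
--
--     return strings
-- ===== SOURCE B (Python) =====
-- def moveString(strings, startstring):
--     front = []
--     back = []
--     for s in strings:
--         if s.startswith(startstring):
--             front.append(s)
--         else:
--             back.append(s)
--     strings[:] = front + back
--     return strings
-- ===== Notes on version B (the rewrite author's own statement) =====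
-- stated objective: simpler
-- what changed: Replaced A's per-match right-shift insertion (a nested inner loop moving each matching string to the front) by a one-pass stable partition into two lists that are concatenated and written back in place.
import Mathlib
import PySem

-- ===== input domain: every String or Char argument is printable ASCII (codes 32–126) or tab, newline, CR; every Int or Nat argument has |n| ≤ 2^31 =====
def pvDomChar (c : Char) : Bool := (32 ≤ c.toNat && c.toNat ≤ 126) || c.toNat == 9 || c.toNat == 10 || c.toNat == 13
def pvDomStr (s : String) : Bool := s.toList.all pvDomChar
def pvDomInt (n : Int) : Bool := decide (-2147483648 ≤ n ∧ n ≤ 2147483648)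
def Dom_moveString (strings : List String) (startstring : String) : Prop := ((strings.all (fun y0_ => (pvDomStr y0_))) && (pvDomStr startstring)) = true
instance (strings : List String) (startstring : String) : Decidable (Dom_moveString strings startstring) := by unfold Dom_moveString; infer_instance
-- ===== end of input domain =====

-- B replaces A's per-match right-shift insertion by a one-pass stable partition into two lists;
-- both A and B mutate the caller's list in place in Python (B via strings[:] = ...), so side effects match too;
-- the equivalence proved here is about the return value.

-- ===== PORT A =====
-- inner loop body: strings[k] = strings[k-1]
def pvShift (l : List String) (k : Int) : List String :=
  PySem.List.pySetD l k (PySem.List.pyGetD l (k - 1) "")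

-- outer loop body over state (strings, i)
def pvAStep (startstring : String) (st : List String × Int) (j : Int) : List String × Int :=
  if PySem.Str.startswith (PySem.List.pyGetD st.1 j "") startstring then
    let s := PySem.List.pyGetD st.1 j ""
    let l := (PySem.List.pyRange j st.2 (-1)).foldl pvShift st.1
    (PySem.List.pySetD l st.2 s, st.2 + 1)
  else st

def moveString (strings : List String) (startstring : String) : List String :=
  ((PySem.List.pyRange 0 (PySem.List.len strings) 1).foldl (pvAStep startstring) (strings, 0)).1

-- ===== PORT B =====
def pvBStep (startstring : String) (fb : List String × List String) (s : String) : List String × List String :=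
  if PySem.Str.startswith s startstring then (fb.1 ++ [s], fb.2) else (fb.1, fb.2 ++ [s])

def moveString_alt (strings : List String) (startstring : String) : List String :=
  let fb := strings.foldl (pvBStep startstring) ([], [])
  fb.1 ++ fb.2

-- ===== PRECONDITION & SPEC =====
def Spec_moveString (strings : List String) (startstring : String) (out : List String) : Prop := out = moveString_alt strings startstring
instance (strings : List String) (startstring : String) (out : List String) : Decidable (Spec_moveString strings startstring out) := by unfold Spec_moveString; infer_instance

-- ===== CLAIM (what is proved, stated in full; the proofs are below) =====
def Claim_equal_moveString : Prop := ∀ (strings : List String) (startstring : String), Dom_moveString strings startstring → Spec_moveString strings startstring (moveString strings startstring)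

-- ===== LEMMAS AND PROOFS =====

-- reading element at position |M| + |N| of M ++ N ++ x :: R
lemma pv_get_mid (M N R : List String) (x : String) (d : String) :
    PySem.List.pyGetD (M ++ (N ++ x :: R)) ((M.length + N.length : Nat) : Int) d = x := by
  rw [PySem.List.pyGetD_natCast, List.getD_eq_getElem?_getD,
      List.getElem?_append_right (by omega)]
  simp

-- writing at position |M| of M ++ c :: T
lemma pv_set_head (M T : List String) (c v : String) :
    PySem.List.pySetD (M ++ c :: T) ((M.length : Nat) : Int) v = M ++ v :: T := by
  simp [PySem.List.pySetD_natCast]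

-- the inner shift loop moves the slot content right by one over N
lemma pv_shift_loop (N : List String) : ∀ (M R : List String) (x : String),
    (PySem.List.pyRange ((M.length + N.length : Nat) : Int) ((M.length : Nat) : Int) (-1)).foldl
      pvShift (M ++ (N ++ x :: R))
    = M ++ (N.headD x :: (N ++ R)) := by
  induction N using List.reverseRecOn with
  | nil =>
    intro M R x
    rw [PySem.List.pyRange_neg_one_eq_nil (by simp)]
    simp
  | append_singleton N' y ih =>
    intro M R x
    have hcons : PySem.List.pyRange ((M.length + (N' ++ [y]).length : Nat) : Int)
        ((M.length : Nat) : Int) (-1)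
        = ((M.length + (N' ++ [y]).length : Nat) : Int) ::
          PySem.List.pyRange (((M.length + (N' ++ [y]).length : Nat) : Int) - 1)
            ((M.length : Nat) : Int) (-1) := by
      exact PySem.List.pyRange_neg_one_cons (by push_cast [List.length_append, List.length_cons, List.length_nil]; omega)
    rw [hcons, List.foldl_cons]
    have h1 : pvShift (M ++ (N' ++ [y] ++ x :: R)) ((M.length + (N' ++ [y]).length : Nat) : Int)
        = M ++ (N' ++ [y] ++ (y :: R)) := by
      unfold pvShift
      have hidx : ((M.length + (N' ++ [y]).length : Nat) : Int) - 1
          = ((M.length + N'.length : Nat) : Int) := by push_cast [List.length_append, List.length_cons, List.length_nil]; omega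
      rw [hidx]
      have hg : PySem.List.pyGetD (M ++ (N' ++ [y] ++ x :: R)) ((M.length + N'.length : Nat) : Int) "" = y := by
        have h := pv_get_mid M N' (x :: R) y ""
        simpa using h
      rw [hg]
      have : (M ++ (N' ++ [y] ++ x :: R)) = (M ++ N' ++ [y]) ++ x :: R := by simp
      rw [this]
      have hlen : ((M.length + (N' ++ [y]).length : Nat) : Int) = (((M ++ N' ++ [y]).length : Nat) : Int) := by
        simp
      rw [hlen, pv_set_head (M ++ N' ++ [y]) R x y]
      simp
    have hidx2 : ((M.length + (N' ++ [y]).length : Nat) : Int) - 1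
        = ((M.length + N'.length : Nat) : Int) := by push_cast [List.length_append, List.length_cons, List.length_nil]; omega
    rw [h1, hidx2]
    have := ih M (y :: R) y
    rw [show (M ++ (N' ++ [y] ++ (y :: R))) = M ++ (N' ++ y :: y :: R) by simp] at *
    rw [this]
    cases N' <;> simp

-- the outer loop maintains (matched-so-far ++ unmatched-so-far ++ rest, count of matched)
lemma pv_outer_loop (ss : String) (R : List String) : ∀ (M N : List String),
    (PySem.List.pyRange ((M.length + N.length : Nat) : Int)
        ((M.length + N.length + R.length : Nat) : Int) 1).foldl
      (pvAStep ss) (M ++ (N ++ R), ((M.length : Nat) : Int))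
    = (M ++ ((R.filter (fun s => PySem.Str.startswith s ss)) ++
        (N ++ R.filter (fun s => !PySem.Str.startswith s ss))),
       ((M.length + (R.filter (fun s => PySem.Str.startswith s ss)).length : Nat) : Int)) := by
  induction R with
  | nil =>
    intro M N
    rw [PySem.List.pyRange_one_eq_nil (by simp)]
    simp
  | cons x R' ih =>
    intro M N
    have hcons : PySem.List.pyRange ((M.length + N.length : Nat) : Int)
        ((M.length + N.length + (x :: R').length : Nat) : Int) 1
        = ((M.length + N.length : Nat) : Int) ::
          PySem.List.pyRange (((M.length + N.length : Nat) : Int) + 1)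
            ((M.length + N.length + (x :: R').length : Nat) : Int) 1 := by
      exact PySem.List.pyRange_one_cons (by push_cast [List.length_append, List.length_cons, List.length_nil]; omega)
    rw [hcons, List.foldl_cons]
    have hget : PySem.List.pyGetD (M ++ (N ++ x :: R')) ((M.length + N.length : Nat) : Int) "" = x :=
      pv_get_mid M N R' x ""
    by_cases hp : PySem.Str.startswith x ss = true
    · have hstep : pvAStep ss (M ++ (N ++ x :: R'), ((M.length : Nat) : Int))
          ((M.length + N.length : Nat) : Int)
          = ((M ++ [x]) ++ (N ++ R'), (((M ++ [x]).length : Nat) : Int)) := by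
        unfold pvAStep
        simp only [hget, hp, if_true]
        rw [pv_shift_loop N M R' x, pv_set_head M (N ++ R') (N.headD x) x]
        simp
      rw [hstep]
      have harg : ((M.length + N.length : Nat) : Int) + 1
          = (((M ++ [x]).length + N.length : Nat) : Int) := by push_cast [List.length_append, List.length_cons, List.length_nil]; omega
      have harg2 : ((M.length + N.length + (x :: R').length : Nat) : Int)
          = (((M ++ [x]).length + N.length + R'.length : Nat) : Int) := by push_cast [List.length_append, List.length_cons, List.length_nil]; omega
      rw [harg, harg2, ih (M ++ [x]) N]
      rw [PySem.Str.startswith_eq] at hp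
      simp [hp]
      omega
    · have hstep : pvAStep ss (M ++ (N ++ x :: R'), ((M.length : Nat) : Int))
          ((M.length + N.length : Nat) : Int)
          = (M ++ ((N ++ [x]) ++ R'), ((M.length : Nat) : Int)) := by
        unfold pvAStep
        simp only [hget, hp, if_false, Bool.false_eq_true]
        simp
      rw [hstep]
      have harg : ((M.length + N.length : Nat) : Int) + 1
          = ((M.length + (N ++ [x]).length : Nat) : Int) := by push_cast [List.length_append, List.length_cons, List.length_nil]; omega
      have harg2 : ((M.length + N.length + (x :: R').length : Nat) : Int)
          = ((M.length + (N ++ [x]).length + R'.length : Nat) : Int) := by push_cast [List.length_append, List.length_cons, List.length_nil]; omega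
      rw [harg, harg2, ih M (N ++ [x])]
      rw [PySem.Str.startswith_eq] at hp
      simp [hp]

-- B's accumulator fold computes the two filters
lemma pv_b_fold (ss : String) (l : List String) : ∀ (f b : List String),
    l.foldl (pvBStep ss) (f, b)
    = (f ++ l.filter (fun s => PySem.Str.startswith s ss),
       b ++ l.filter (fun s => !PySem.Str.startswith s ss)) := by
  induction l with
  | nil => intro f b; simp
  | cons x t ih =>
    intro f b
    by_cases hp : PySem.Str.startswith x ss = true <;>
      rw [PySem.Str.startswith_eq] at hp <;>
      simp [pvBStep, hp, ih, PySem.Str.startswith_eq]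

-- ===== VERDICT (by name: the statement is the Claim_ definition above) =====
theorem moveString_spec : Claim_equal_moveString := by
  intro strings startstring _
  unfold Spec_moveString moveString moveString_alt
  have h0 : (0 : Int) = (((([] : List String)).length + (([] : List String)).length : Nat) : Int) := by simp
  have hn : PySem.List.len strings
      = ((([] : List String).length + ([] : List String).length + strings.length : Nat) : Int) := by
    simp [PySem.List.len_eq]
  have hs : strings = ([] : List String) ++ (([] : List String) ++ strings) := by simp
  rw [show (PySem.List.pyRange 0 (PySem.List.len strings) 1).foldl (pvAStep startstring) (strings, 0)
      = (PySem.List.pyRange ((([] : List String).length + ([] : List String).length : Nat) : Int)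
          ((([] : List String).length + ([] : List String).length + strings.length : Nat) : Int) 1).foldl
          (pvAStep startstring) (([] : List String) ++ (([] : List String) ++ strings),
            ((([] : List String).length : Nat) : Int)) by
    rw [← h0, ← hn, ← hs]; simp]
  rw [pv_outer_loop startstring strings [] []]
  rw [pv_b_fold startstring strings [] []]
  simp
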